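-- pv_equiv track=rewrite | github.com/hexszeug/bwinf-40-dev | 2_Runde/4_Aufgabe/dev/src/try1.py | search_xored_cards
-- ===== SOURCE A (Python) =====
-- from collections.abc import Callable
--
-- def search_xored_cards(card_pool: list, card_group_size: int) -> list:
--
--     def combine_elements(combination_pool: list, group_size: int, recall: Callable[[list], None]):
--         def combi_level(pool: list, depth: int, pre_combi: list):
--             if depth == 0:
--                 recall(pre_combi)
--                 return
--             for i, x in enumerate(pool):
--                 new_pre_combi = pre_combi[:]; new_pre_combi.append(x)
--                 combi_level(pool[i+1:], depth-1, new_pre_combi)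
--         combi_level(combination_pool, group_size, [])
--
--     def xor_list(list: list):
--         xor = 0
--         for elm in list:
--             xor = xor ^ elm
--         return xor
--
--     xored_cards = []
--     def save_xored_cards(card_combination: list):
--         xor = xor_list(card_combination[:-1])
--         if xor == card_combination[-1]:
--             xored_cards.append(card_combination)
--
--     combine_elements(card_pool, card_group_size + 1, save_xored_cards)
--
--     return xored_cards
-- ===== SOURCE B (Python) =====
-- def search_xored_cards(card_pool: list, card_group_size: int) -> list:
--     # Iterative DFS with an explicit stack: carries the running XOR and the number of
--     # cards still needed, and prunes branches with fewer remaining cards than needed.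
--     need0 = card_group_size + 1
--     if need0 < 0:
--         return []
--     n = len(card_pool)
--     xored_cards = []
--     stack = [(0, need0, 0, [])]  # (next index, cards still needed, running xor, chosen cards)
--     while stack:
--         i, need, xor, chosen = stack.pop()
--         if need == 0:
--             if xor == 0:
--                 xored_cards.append(chosen)
--             continue
--         if n - i < need:
--             continue
--         card = card_pool[i]
--         # push the skip-branch first so the take-branch is explored first (A's order)
--         stack.append((i + 1, need, xor, chosen))
--         stack.append((i + 1, need - 1, xor ^ card, chosen + [card]))
--     return xored_cards
-- ===== Notes on version B (the rewrite author's own statement) =====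
-- stated objective: faster
-- what changed: Replaces A's nested recursive combination generator (which copies the prefix at every level and re-XORs each full combination via xor_list) by a single iterative explicit-stack DFS that carries the running XOR and the number of cards still needed, pruning any branch with fewer remaining cards than needed.
import Mathlib
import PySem

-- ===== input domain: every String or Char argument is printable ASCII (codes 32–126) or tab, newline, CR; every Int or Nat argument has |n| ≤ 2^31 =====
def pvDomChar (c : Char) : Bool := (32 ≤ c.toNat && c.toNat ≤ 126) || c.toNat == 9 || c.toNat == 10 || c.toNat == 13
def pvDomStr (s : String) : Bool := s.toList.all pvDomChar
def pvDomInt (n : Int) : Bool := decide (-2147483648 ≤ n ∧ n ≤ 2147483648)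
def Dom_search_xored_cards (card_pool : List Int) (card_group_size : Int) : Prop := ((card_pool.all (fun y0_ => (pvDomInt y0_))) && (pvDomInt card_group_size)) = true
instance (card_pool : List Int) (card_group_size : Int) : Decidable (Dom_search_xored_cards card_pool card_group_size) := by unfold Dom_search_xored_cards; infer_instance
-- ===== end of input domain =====

-- B replaces A's per-leaf xor recomputation and nested recursion by an explicit-stack DFS
-- carrying a running XOR and a remaining-count that prunes dead branches (objective: faster).


-- ===== PORT A =====
-- xor_list: xor = 0; for elm in list: xor = xor ^ elm  (Python ^ = PySem.Int.bxor)
def pvA_xorList (l : List Int) : Int := l.foldl (fun x e => PySem.Int.bxor x e) 0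

-- save_xored_cards: appends card_combination iff xor_list(cc[:-1]) == cc[-1];
-- cc[-1] on an empty cc is Python's IndexError (pyGet? = none), excluded by Pre_.
def pvA_save (pre : List Int) (acc : List (List Int)) : List (List Int) :=
  match PySem.List.pyGet? pre (-1) with
  | none => acc
  | some last =>
      if pvA_xorList (PySem.List.slice pre none (some (-1))) = last then acc ++ [pre] else acc

-- combi_level: 'for i, x in enumerate(pool): combi_level(pool[i+1:], depth-1, pre+[x])';
-- the head iteration is the first recursive call, the remaining loop iterations are the
-- same loop over rest (pool[i+1:] for i ≥ 1 = rest[j+1:] for j ≥ 0).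
def pvA_combiLevel (pool : List Int) (depth : Int) (pre : List Int) (acc : List (List Int)) :
    List (List Int) :=
  if depth = 0 then pvA_save pre acc
  else
    match pool with
    | [] => acc
    | x :: rest => pvA_combiLevel rest depth pre (pvA_combiLevel rest (depth - 1) (pre ++ [x]) acc)

def search_xored_cards (card_pool : List Int) (card_group_size : Int) : List (List Int) :=
  pvA_combiLevel card_pool (card_group_size + 1) [] []

-- ===== PORT B =====
-- termination helper for B's stack loop
theorem pvB_weight_step (n i : Nat) (h : i + 1 ≤ n) :
    3 ^ (n + 1 - (i + 1)) + 3 ^ (n + 1 - (i + 1)) < 3 ^ (n + 1 - i) := by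
  have h1 : n + 1 - i = (n - i) + 1 := by omega
  have h2 : n + 1 - (i + 1) = n - i := by omega
  have h3 : 0 < 3 ^ (n - i) := Nat.pow_pos (by norm_num)
  rw [h1, h2, pow_succ]
  omega

def pvB_weight (n : Nat) (e : Nat × Nat × Int × List Int) : Nat := 3 ^ (n + 1 - e.1)

-- B's while loop over the explicit stack; stack head = top of the Python stack.
-- The index i and the remaining count need are ≥ 0 throughout B's run (Nat).
def pvB_run (cp : List Int) (stack : List (Nat × Nat × Int × List Int))
    (out : List (List Int)) : List (List Int) :=
  match stack with
  | [] => out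
  | (i, need, xr, chosen) :: rest =>
    if need = 0 then
      pvB_run cp rest (if xr = 0 then out ++ [chosen] else out)
    else if (cp.length : Int) - (i : Int) < (need : Int) then
      pvB_run cp rest out
    else
      match PySem.List.pyGet? cp (i : Int) with
      | none => pvB_run cp rest out   -- unreachable: the guard guarantees i < cp.length
      | some c =>
          pvB_run cp
            ((i + 1, need - 1, PySem.Int.bxor xr c, chosen ++ [c]) :: (i + 1, need, xr, chosen) :: rest) out
termination_by (stack.map (pvB_weight cp.length)).sum
decreasing_by
  all_goals simp only [List.map_cons, List.sum_cons, pvB_weight]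
  all_goals first
    | exact Nat.lt_add_of_pos_left (Nat.pow_pos (by norm_num))
    | (rw [← Nat.add_assoc]
       exact Nat.add_lt_add_right (pvB_weight_step cp.length i (by omega)) _)

def search_xored_cards_alt (card_pool : List Int) (card_group_size : Int) : List (List Int) :=
  if card_group_size + 1 < 0 then []
  else pvB_run card_pool [(0, (card_group_size + 1).toNat, 0, [])] []

-- ===== PRECONDITION & SPEC =====
-- Pre_ excludes only card_group_size = -1, where A's save step evaluates [][-1] and
-- raises IndexError; B returns [[]] there.
def Pre_search_xored_cards (card_pool : List Int) (card_group_size : Int) : Prop :=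
  card_group_size ≠ -1
instance (card_pool : List Int) (card_group_size : Int) :
    Decidable (Pre_search_xored_cards card_pool card_group_size) := by
  unfold Pre_search_xored_cards; infer_instance

def pvWitness_search_xored_cards : List Int × Int := ([1, 2, 3], 2)

def Spec_search_xored_cards (card_pool : List Int) (card_group_size : Int)
    (out : List (List Int)) : Prop := out = search_xored_cards_alt card_pool card_group_size
instance (card_pool : List Int) (card_group_size : Int) (out : List (List Int)) :
    Decidable (Spec_search_xored_cards card_pool card_group_size out) := by
  unfold Spec_search_xored_cards; infer_instance

-- ===== CLAIM (what is proved, stated in full; the proofs are below) =====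
def Claim_equal_search_xored_cards : Prop := ∀ (card_pool : List Int) (card_group_size : Int), Dom_search_xored_cards card_pool card_group_size → Pre_search_xored_cards card_pool card_group_size → Spec_search_xored_cards card_pool card_group_size (search_xored_cards card_pool card_group_size)


-- ===== LEMMAS AND PROOFS =====

theorem pv_bxor_eq_zero_iff (a b : Int) : PySem.Int.bxor a b = 0 ↔ a = b := by
  unfold PySem.Int.bxor
  split_ifs with h1 h2 h2 <;>
    [ (rw [show ((a.toNat ^^^ b.toNat : Nat) : Int) = 0 ↔ (a.toNat ^^^ b.toNat) = 0 by exact_mod_cast Iff.rfl, Nat.xor_eq_zero_iff]; omega);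
      (constructor <;> intro h <;> omega);
      (constructor <;> intro h <;> omega);
      (rw [show (((-a-1).toNat ^^^ (-b-1).toNat : Nat) : Int) = 0 ↔ ((-a-1).toNat ^^^ (-b-1).toNat) = 0 by exact_mod_cast Iff.rfl, Nat.xor_eq_zero_iff]; omega)]

-- E': what one stack entry of B contributes, as a take/skip recursion over the remaining suffix.
def pvE' (pool : List Int) (need : Nat) (xr : Int) (chosen : List Int) : List (List Int) :=
  if need = 0 then (if xr = 0 then [chosen] else [])
  else if pool.length < need then []
  else
    match pool with
    | [] => []
    | c :: rest =>
        pvE' rest (need - 1) (PySem.Int.bxor xr c) (chosen ++ [c]) ++ pvE' rest need xr chosen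

theorem pvB_run_eq (cp : List Int) (stack : List (Nat × Nat × Int × List Int))
    (out : List (List Int)) :
    pvB_run cp stack out =
      out ++ (stack.map (fun e => pvE' (cp.drop e.1) e.2.1 e.2.2.1 e.2.2.2)).flatten := by
  fun_induction pvB_run cp stack out with
  | case1 => simp
  | case2 =>
      rename_i i xr chosen rest ih
      simp only [dite_eq_ite] at ih
      rw [ih]
      have hE : pvE' (cp.drop i) 0 xr chosen = (if xr = 0 then [chosen] else []) := by
        rw [pvE'.eq_def]; simp
      simp only [List.map_cons, List.flatten_cons, hE]
      split_ifs <;> simp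
  | case3 =>
      rename_i i need xr chosen rest h1 h2 ih
      rw [ih]
      have hlen : (cp.drop i).length < need := by
        have := List.length_drop (l := cp) (i := i); omega
      have hE : pvE' (cp.drop i) need xr chosen = [] := by
        rw [pvE'.eq_def, if_neg h1, if_pos hlen]
      simp [hE]
  | case4 =>
      rename_i i need xr chosen rest h1 h2 hget ih
      exfalso
      have hin : PySem.Raise.InRange cp.length (i : Int) := by
        constructor <;> omega
      rw [PySem.List.pyGet?_eq_none_iff] at hget
      exact hget hin
  | case5 =>
      rename_i i need xr chosen rest h1 h2 c hget ih
      rw [ih]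
      have hi : i < cp.length := by omega
      have hd : cp.drop i = c :: cp.drop (i + 1) := by
        rw [List.drop_eq_getElem_cons hi]
        rw [PySem.List.pyGet?_natCast, List.getElem?_eq_getElem hi] at hget
        simp only [Option.some.injEq] at hget
        rw [hget]
      have hlen : ¬ (cp.drop i).length < need := by
        have := List.length_drop (l := cp) (i := i); omega
      have hE : pvE' (cp.drop i) need xr chosen =
          pvE' (cp.drop (i + 1)) (need - 1) (PySem.Int.bxor xr c) (chosen ++ [c]) ++
            pvE' (cp.drop (i + 1)) need xr chosen := by
        rw [pvE'.eq_def, hd]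
        simp only [if_neg h1, List.length_cons]
        rw [if_neg (by rw [hd] at hlen; simpa using hlen)]
      simp [hE]

-- A's saved-combination condition equals "the whole combination xors to 0".
theorem pvA_xorList_append (l : List Int) (x : Int) :
    pvA_xorList (l ++ [x]) = PySem.Int.bxor (pvA_xorList l) x := by
  simp [pvA_xorList]

theorem pvA_save_eq (pre : List Int) (acc : List (List Int)) (h : pre ≠ []) :
    pvA_save pre acc = acc ++ (if pvA_xorList pre = 0 then [pre] else []) := by
  obtain ⟨l, x, rfl⟩ : ∃ l x, pre = l ++ [x] := by
    rcases List.eq_nil_or_concat pre with h' | ⟨l, x, h'⟩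
    · exact absurd h' h
    · exact ⟨l, x, by simpa using h'⟩
  rw [pvA_save]
  rw [PySem.List.pyGet?_neg_one_append_singleton]
  simp only [PySem.List.slice_to_neg_one, List.dropLast_concat]
  rw [pvA_xorList_append]
  by_cases hx : pvA_xorList l = x
  · rw [if_pos hx, if_pos ((pv_bxor_eq_zero_iff _ _).mpr hx)]
  · rw [if_neg hx, if_neg (fun hc => hx ((pv_bxor_eq_zero_iff _ _).mp hc))]
    simp

-- A with a negative depth never reaches depth 0 and contributes nothing.
theorem pvA_combiLevel_neg :
    ∀ (pool : List Int) (depth : Int) (pre : List Int) (acc : List (List Int)),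
      depth < 0 → pvA_combiLevel pool depth pre acc = acc := by
  intro pool
  induction pool with
  | nil => intro depth pre acc h; rw [pvA_combiLevel.eq_def]; simp [show ¬ depth = 0 by omega]
  | cons x rest ih =>
      intro depth pre acc h
      rw [pvA_combiLevel.eq_def]
      simp only [if_neg (show ¬ depth = 0 by omega)]
      rw [ih (depth - 1) (pre ++ [x]) acc (by omega), ih depth pre acc h]

-- Main bridge: A's recursion equals E' on the same suffix, for a Nat depth.
theorem pvA_eq_pvE' :
    ∀ (pool : List Int) (need : Nat) (pre : List Int) (acc : List (List Int)),
      (need = 0 → pre ≠ []) →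
      pvA_combiLevel pool (need : Int) pre acc = acc ++ pvE' pool need (pvA_xorList pre) pre := by
  intro pool
  induction pool with
  | nil =>
      intro need pre acc h
      rw [pvA_combiLevel.eq_def, pvE'.eq_def]
      by_cases h0 : need = 0
      · subst h0
        simp only [Nat.cast_zero, if_pos]
        exact pvA_save_eq pre acc (h rfl)
      · have : ¬ ((need : Int) = 0) := by exact_mod_cast h0
        simp [h0, Nat.pos_of_ne_zero h0]
  | cons x rest ih =>
      intro need pre acc h
      rw [pvA_combiLevel.eq_def, pvE'.eq_def]
      by_cases h0 : need = 0
      · subst h0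
        simp only [Nat.cast_zero, if_pos]
        exact pvA_save_eq pre acc (h rfl)
      · have hne : ¬ ((need : Int) = 0) := by exact_mod_cast h0
        simp only [if_neg hne, if_neg h0]
        have hcast : (need : Int) - 1 = ((need - 1 : Nat) : Int) := by omega
        rw [hcast]
        rw [ih (need - 1) (pre ++ [x]) acc (by intro _; simp)]
        rw [ih need pre _ (fun hc => absurd hc h0)]
        rw [pvA_xorList_append]
        by_cases hlen : (x :: rest).length < need
        · have hr1 : pvE' rest (need - 1) (PySem.Int.bxor (pvA_xorList pre) x) (pre ++ [x]) = [] := by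
            rw [pvE'.eq_def]
            have h1 : ¬ (need - 1) = 0 := by simp at hlen; omega
            rw [if_neg h1, if_pos (by simp at hlen; omega)]
          have hr2 : pvE' rest need (pvA_xorList pre) pre = [] := by
            rw [pvE'.eq_def]
            rw [if_neg h0, if_pos (by simp at hlen; omega)]
          rw [if_pos hlen, hr1, hr2]
          simp
        · rw [if_neg hlen]
          simp [List.append_assoc]

-- ===== VERDICT (by name: the statement is the Claim_ definition above) =====
theorem search_xored_cards_spec : Claim_equal_search_xored_cards := by
  intro cp g _ hpre
  unfold Spec_search_xored_cards search_xored_cards search_xored_cards_alt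
  by_cases hneg : g + 1 < 0
  · rw [if_pos hneg, pvA_combiLevel_neg _ _ _ _ hneg]
  · rw [if_neg hneg]
    rw [pvB_run_eq]
    simp only [List.map_cons, List.map_nil, List.flatten_cons, List.flatten_nil,
      List.append_nil, List.nil_append]
    simp only [List.drop_zero]
    have hk : ((g + 1).toNat : Int) = g + 1 := by omega
    have hk0 : (g + 1).toNat ≠ 0 := by
      intro hc
      exact hpre (by omega)
    rw [← hk]
    rw [pvA_eq_pvE' cp ((g + 1).toNat) [] [] (fun hc => absurd hc hk0)]
    have hmax : max (g + 1) 0 = g + 1 := by omega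
    simp [pvA_xorList, hmax]
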